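-- pv_equiv track=rewrite | github.com/Ninacio/WaveID | waveid_platform/scripts/summarise_evaluation.py | _build_group_stats
-- ===== SOURCE A (Python) =====
-- from collections import defaultdict
--
-- def _build_group_stats(
--     rows: list[dict[str, str]],
--     key_field: str,
-- ) -> dict[str, dict[str, int]]:
--     """Count total queries, top-1 hits, and top-k hits for each unique value of key_field."""
--     grouped: dict[str, dict[str, int]] = defaultdict(
--         lambda: {"n": 0, "top1": 0, "topk": 0}
--     )
--     for row in rows:
--         key = row.get(key_field, "unknown")
--         hit_top1 = int(row.get("hit_top1", "0") or 0)
--         hit_topk = int(row.get("hit_topk", "0") or 0)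
--         grouped[key]["n"] += 1
--         grouped[key]["top1"] += hit_top1
--         grouped[key]["topk"] += hit_topk
--     return grouped
-- ===== SOURCE B (Python) =====
-- from collections import defaultdict
--
--
-- def _build_group_stats(
--     rows: list[dict[str, str]],
--     key_field: str,
-- ) -> dict[str, dict[str, int]]:
--     """Count total queries, top-1 hits, and top-k hits for each unique value of key_field."""
--     # Phase 1: partition rows into groups keyed by key_field, first-seen order.
--     groups: dict[str, list[dict[str, str]]] = {}
--     for row in rows:
--         groups.setdefault(row.get(key_field, "unknown"), []).append(row)
--     # Phase 2: aggregate each group in one go.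
--     result: dict[str, dict[str, int]] = defaultdict(
--         lambda: {"n": 0, "top1": 0, "topk": 0}
--     )
--     for key, grp in groups.items():
--         result[key] = {
--             "n": len(grp),
--             "top1": sum(int(r.get("hit_top1", "0") or 0) for r in grp),
--             "topk": sum(int(r.get("hit_topk", "0") or 0) for r in grp),
--         }
--     return result
-- ===== Notes on version B (the rewrite author's own statement) =====
-- stated objective: alternative
-- what changed: Replaces the single incremental counting loop over a defaultdict of mutable counters by a two-phase decomposition: first partition the rows into groups keyed by key_field (first-seen order), then compute n/top1/topk for each group at once with len and sum.
import Mathlib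
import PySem

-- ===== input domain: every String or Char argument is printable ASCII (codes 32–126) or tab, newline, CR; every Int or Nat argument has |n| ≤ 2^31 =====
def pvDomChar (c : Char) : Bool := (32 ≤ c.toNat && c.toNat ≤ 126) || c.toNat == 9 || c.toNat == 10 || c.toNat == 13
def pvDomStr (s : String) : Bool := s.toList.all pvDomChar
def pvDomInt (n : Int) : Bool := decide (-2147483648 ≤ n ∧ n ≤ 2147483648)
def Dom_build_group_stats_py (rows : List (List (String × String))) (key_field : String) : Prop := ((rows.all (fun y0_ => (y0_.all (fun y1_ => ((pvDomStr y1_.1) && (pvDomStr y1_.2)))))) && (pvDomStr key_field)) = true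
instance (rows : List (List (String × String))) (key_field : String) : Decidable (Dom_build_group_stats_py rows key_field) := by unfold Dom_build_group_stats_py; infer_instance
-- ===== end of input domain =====

-- B replaces A's single incremental counting loop by a two-phase decomposition (partition rows
-- into groups, then aggregate each group with len/sum); same asymptotic cost, alternative structure.
-- A and B both raise ValueError on unparseable hit strings; those inputs are excluded by Pre_.

-- ===== PORT A =====
-- shared primitive: row.get(f, dflt) — first match in the association list
def pvRowGet (row : List (String × String)) (f dflt : String) : String :=
  match row.find? (fun p => p.1 == f) with
  | some p => p.2
  | none => dflt

-- int(row.get(f, "0") or 0); the `.getD 0` branch is unreachable under Pre_ (Python raises there)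
def pvHit (row : List (String × String)) (f : String) : Int :=
  let v := pvRowGet row f "0"
  if v = "" then 0 else (PySem.Int.ofStr? v).getD 0

-- the defaultdict factory {"n": 0, "top1": 0, "topk": 0}
def pvD0 : PySem.Dict String Int := PySem.Dict.ofList [("n", 0), ("top1", 0), ("topk", 0)]

-- one iteration of A's loop: grouped[key]["n"] += 1; grouped[key]["top1"] += hit_top1; grouped[key]["topk"] += hit_topk
def pvStepA (key_field : String) (g : PySem.Dict String (PySem.Dict String Int))
    (row : List (String × String)) : PySem.Dict String (PySem.Dict String Int) :=
  let key := pvRowGet row key_field "unknown"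
  let hit_top1 := pvHit row "hit_top1"
  let hit_topk := pvHit row "hit_topk"
  let g := g.modify key pvD0 (fun d => d.insert "n" (d.getD "n" 0 + 1))
  let g := g.modify key pvD0 (fun d => d.insert "top1" (d.getD "top1" 0 + hit_top1))
  let g := g.modify key pvD0 (fun d => d.insert "topk" (d.getD "topk" 0 + hit_topk))
  g

def build_group_stats_py (rows : List (List (String × String))) (key_field : String) :
    List (String × List (String × Int)) :=
  ((rows.foldl (pvStepA key_field) PySem.Dict.empty).items).map (fun p => (p.1, p.2.items))

-- ===== PORT B =====
def build_group_stats_py_alt (rows : List (List (String × String))) (key_field : String) :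
    List (String × List (String × Int)) :=
  -- phase 1: groups.setdefault(row.get(key_field, "unknown"), []).append(row)
  let groups : PySem.Dict String (List (List (String × String))) :=
    rows.foldl (fun d row => d.modify (pvRowGet row key_field "unknown") [] (· ++ [row]))
      PySem.Dict.empty
  -- phase 2: result[key] = {"n": len(grp), "top1": sum(...), "topk": sum(...)}
  groups.items.map (fun p =>
    (p.1, [("n", (p.2.length : Int)),
           ("top1", (p.2.map (fun r => pvHit r "hit_top1")).sum),
           ("topk", (p.2.map (fun r => pvHit r "hit_topk")).sum)]))

-- ===== PRECONDITION & SPEC =====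
-- Pre_ excludes exactly the rows on which Python's int() raises ValueError: a non-empty
-- 'hit_top1'/'hit_topk' value that is not a valid int literal.
def pvOkField (row : List (String × String)) (f : String) : Bool :=
  pvRowGet row f "0" == "" || (PySem.Int.ofStr? (pvRowGet row f "0")).isSome

def Pre_build_group_stats_py (rows : List (List (String × String))) (key_field : String) : Prop :=
  (rows.all (fun r => pvOkField r "hit_top1" && pvOkField r "hit_topk")) = true

instance (rows : List (List (String × String))) (key_field : String) :
    Decidable (Pre_build_group_stats_py rows key_field) := by
  unfold Pre_build_group_stats_py; infer_instance

def pvWitness_build_group_stats_py : (List (List (String × String))) × String :=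
  ([[("model", "a"), ("hit_top1", "1"), ("hit_topk", "1")], [("model", "b")]], "model")

def Spec_build_group_stats_py (rows : List (List (String × String))) (key_field : String)
    (out : List (String × List (String × Int))) : Prop :=
  out = build_group_stats_py_alt rows key_field

instance (rows : List (List (String × String))) (key_field : String)
    (out : List (String × List (String × Int))) :
    Decidable (Spec_build_group_stats_py rows key_field out) := by
  unfold Spec_build_group_stats_py; infer_instance

-- ===== CLAIM (what is proved, stated in full; the proofs are below) =====
def Claim_equal_build_group_stats_py : Prop := ∀ (rows : List (List (String × String))) (key_field : String), Dom_build_group_stats_py rows key_field → Pre_build_group_stats_py rows key_field → Spec_build_group_stats_py rows key_field (build_group_stats_py rows key_field)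

-- ===== LEMMAS AND PROOFS =====

-- the inner stats dict a group of rows denotes
def pvStats (rs : List (List (String × String))) : PySem.Dict String Int :=
  PySem.Dict.mk [("n", (rs.length : Int)),
                 ("top1", (rs.map (fun r => pvHit r "hit_top1")).sum),
                 ("topk", (rs.map (fun r => pvHit r "hit_topk")).sum)]

def pvMapVals {ν ν' : Type} (f : ν → ν') (d : PySem.Dict String ν) : PySem.Dict String ν' :=
  PySem.Dict.mk (d.items.map (fun p => (p.1, f p.2)))

theorem pvGet?_mapVals {ν ν' : Type} (f : ν → ν') (d : PySem.Dict String ν) (k : String) :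
    (pvMapVals f d).get? k = (d.get? k).map f := by
  simp [pvMapVals, PySem.Dict.get?, List.find?_map, Function.comp_def, Option.map_map]

theorem pvContains_mapVals {ν ν' : Type} (f : ν → ν') (d : PySem.Dict String ν) (k : String) :
    (pvMapVals f d).contains k = d.contains k := by
  simp [pvMapVals, PySem.Dict.contains, List.any_map, Function.comp_def]

theorem pvGetD_mapVals {ν ν' : Type} (f : ν → ν') (d : PySem.Dict String ν) (k : String) (c : ν) :
    (pvMapVals f d).getD k (f c) = f (d.getD k c) := by
  simp [PySem.Dict.getD, pvGet?_mapVals]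

theorem pvInsert_mapVals {ν ν' : Type} (f : ν → ν') (d : PySem.Dict String ν) (k : String) (w : ν) :
    pvMapVals f (d.insert k w) = (pvMapVals f d).insert k (f w) := by
  simp only [PySem.Dict.insert, pvContains_mapVals]
  by_cases h : d.contains k = true <;> simp [h, pvMapVals, List.map_map, Function.comp_def]
  intro a b _
  by_cases hp : a = k <;> simp [hp]

theorem pvD0_eq : pvD0 = pvStats [] := by decide

theorem pvStats_snoc (rs : List (List (String × String))) (row : List (String × String)) :
    (((pvStats rs).insert "n" ((pvStats rs).getD "n" 0 + 1)).insert "top1"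
        ((((pvStats rs).insert "n" ((pvStats rs).getD "n" 0 + 1)).getD "top1" 0) + pvHit row "hit_top1")).insert "topk"
        (((((pvStats rs).insert "n" ((pvStats rs).getD "n" 0 + 1)).insert "top1"
          ((((pvStats rs).insert "n" ((pvStats rs).getD "n" 0 + 1)).getD "top1" 0) + pvHit row "hit_top1")).getD "topk" 0)
          + pvHit row "hit_topk")
      = pvStats (rs ++ [row]) := by
  simp [pvStats, PySem.Dict.insert, PySem.Dict.getD, PySem.Dict.get?, PySem.Dict.contains,
        List.find?, add_comm]

theorem pvStepA_mapVals (key_field : String) (d : PySem.Dict String (List (List (String × String))))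
    (row : List (String × String)) :
    pvStepA key_field (pvMapVals pvStats d) row
      = pvMapVals pvStats (d.modify (pvRowGet row key_field "unknown") [] (· ++ [row])) := by
  have hget : (pvMapVals pvStats d).getD (pvRowGet row key_field "unknown") pvD0
      = pvStats (d.getD (pvRowGet row key_field "unknown") []) := by
    rw [pvD0_eq]; exact pvGetD_mapVals pvStats d _ []
  simp only [pvStepA, PySem.Dict.modify, PySem.Dict.insert_insert_self, PySem.Dict.getD_insert_self,
    hget, pvInsert_mapVals]
  rw [pvStats_snoc]

theorem pvLoop_eq (key_field : String) (rows : List (List (String × String)))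
    (d : PySem.Dict String (List (List (String × String)))) :
    rows.foldl (pvStepA key_field) (pvMapVals pvStats d)
      = pvMapVals pvStats
          (rows.foldl (fun d row => d.modify (pvRowGet row key_field "unknown") [] (· ++ [row])) d) := by
  induction rows generalizing d with
  | nil => rfl
  | cons r rs ih =>
    simp only [List.foldl_cons, pvStepA_mapVals]
    exact ih _

-- ===== VERDICT (by name: the statement is the Claim_ definition above) =====
theorem build_group_stats_py_spec : Claim_equal_build_group_stats_py := by
  intro rows key_field _ _
  unfold Spec_build_group_stats_py build_group_stats_py build_group_stats_py_alt
  have h0 : (PySem.Dict.empty : PySem.Dict String (PySem.Dict String Int))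
      = pvMapVals pvStats PySem.Dict.empty := rfl
  rw [h0, pvLoop_eq]
  simp [pvMapVals, List.map_map, Function.comp_def, pvStats]
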